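-- pv_equiv track=rewrite | github.com/delee5695/secure_emails | demo/demo_send_message.py | convert_message_to_int
-- ===== SOURCE A (Python) =====
-- def convert_message_to_int(message):
--     """
--     Convert message (str) to a single long integer.
--
--     Args:
--         message: str containing your message
--
--     Returns:
--         message_as_int: the message converted to an integer (int)
--     """
--     # add a one at the beginning to prevent leading zeros from being cut off
--     converted_message = "1"
--
--     for i in message:
--         int_letter = "{:04d}".format(
--             ord(i)
--         )  # Convert single letter to zero-padded ASCII
--         converted_message += int_letter
--     converted_message = int(converted_message)
--     return converted_message  # Return as integer
-- ===== SOURCE B (Python) =====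
-- def convert_message_to_int(message):
--     """
--     Convert message (str) to a single long integer.
--
--     Horner-style accumulation: instead of concatenating zero-padded decimal
--     blocks into a string and parsing it once, keep a running integer and
--     multiply-shift in each character's ordinal (each block is exactly 4
--     decimal digits for the printable-ASCII/control domain this claim covers,
--     since ord(ch) <= 9999 there).  The leading 1 of A's string is the seed.
--     """
--     acc = 1
--     for ch in message:
--         acc = acc * 10000 + ord(ch)
--     return acc
-- ===== Notes on version B (the rewrite author's own statement) =====
-- stated objective: alternative
-- what changed: Replaces building a zero-padded decimal string character by character and parsing it once with int() by a single Horner-style pass that keeps a running integer acc = acc*10000 + ord(ch) seeded with 1.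
import Mathlib
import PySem

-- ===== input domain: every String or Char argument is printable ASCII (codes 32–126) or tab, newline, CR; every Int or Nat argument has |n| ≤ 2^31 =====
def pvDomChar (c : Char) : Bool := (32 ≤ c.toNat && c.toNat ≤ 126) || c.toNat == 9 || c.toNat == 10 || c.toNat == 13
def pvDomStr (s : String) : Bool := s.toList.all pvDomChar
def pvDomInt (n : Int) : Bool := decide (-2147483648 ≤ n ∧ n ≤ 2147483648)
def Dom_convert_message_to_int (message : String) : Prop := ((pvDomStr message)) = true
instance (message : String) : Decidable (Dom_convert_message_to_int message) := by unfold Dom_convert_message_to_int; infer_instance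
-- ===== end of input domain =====

-- B replaces A's zero-padded decimal string building + int() parse by a direct Horner
-- accumulation acc = acc*10000 + ord(c); equivalence is proved on the stated ASCII domain.


-- ===== PORT A =====
-- "{:04d}".format(n) for a nonnegative n is exactly str(n).zfill(4) = PySem.Chars.zfill (toChars n) 4.
-- The final int(converted_message) always parses (the string is '1' followed by decimal digits), so
-- `.getD 0` is never taken on inputs admitted by Pre_; the only way Python's int() fails here is
-- CPython's 4300-digit conversion limit, which Pre_ excludes.
def convert_message_to_int (message : String) : Int :=
  (PySem.Int.ofChars?
    (message.toList.foldl
      (fun acc c => acc ++ PySem.Chars.zfill (PySem.Int.toChars ((c.toNat : Int))) 4)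
      ['1'])).getD 0

-- ===== PORT B =====
def convert_message_to_int_alt (message : String) : Int :=
  message.toList.foldl (fun acc c => acc * 10000 + (c.toNat : Int)) 1

-- ===== PRECONDITION & SPEC =====
-- CPython (3.11) raises ValueError in int() once the built numeral exceeds the 4300-digit
-- conversion limit; on the ASCII domain that happens exactly when 1 + 4*len(message) > 4300,
-- i.e. for messages of 1075 characters or more. Pre_ excludes exactly those inputs.
def Pre_convert_message_to_int (message : String) : Prop := message.toList.length ≤ 1074
instance (message : String) : Decidable (Pre_convert_message_to_int message) := by unfold Pre_convert_message_to_int; infer_instance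
def pvWitness_convert_message_to_int : String := "Hi!"


def Spec_convert_message_to_int (message : String) (out : Int) : Prop := out = convert_message_to_int_alt message
instance (message : String) (out : Int) : Decidable (Spec_convert_message_to_int message out) := by unfold Spec_convert_message_to_int; infer_instance


-- ===== CLAIM =====
def Claim_equal_convert_message_to_int : Prop := ∀ (message : String), Dom_convert_message_to_int message → Pre_convert_message_to_int message → Spec_convert_message_to_int message (convert_message_to_int message)

-- ===== LEMMAS AND PROOFS =====

-- Reference copy of the (private) digit-run parser inside PySem.Int.ofChars?; used only by the proofs.
def myGo : List Char → Bool → Nat → Option Nat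
  | [], afterDigit, acc => if afterDigit = true then some acc else none
  | c :: rest, afterDigit, acc =>
    if c.isDigit = true then myGo rest true (acc * 10 + (c.toNat - '0'.toNat))
    else
      if c = '_' ∧ afterDigit = true then
        match rest with
        | d :: _ => if d.isDigit = true then myGo rest false acc else none
        | [] => none
      else none

-- Any function satisfying the defining equations of ofChars?'s internal digit-run parser equals myGo.
theorem goChar (f : List Char → Bool → Nat → Option Nat)
    (h0 : ∀ b a, f [] b a = if b = true then some a else none)
    (h1 : ∀ c rest b a, f (c :: rest) b a =
      if c.isDigit = true then f rest true (a * 10 + (c.toNat - '0'.toNat))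
      else
        if c = '_' ∧ b = true then
          match rest with
          | d :: _ => if d.isDigit = true then f rest false a else none
          | [] => none
        else none) :
    ∀ cs b a, f cs b a = myGo cs b a := by
  intro cs
  induction cs with
  | nil => intro b a; rw [h0]; rfl
  | cons c rest ih =>
    intro b a
    rw [h1]
    simp only [myGo]
    by_cases hc : c.isDigit = true
    · simp only [hc, if_true, ih]
    · simp only [hc]
      by_cases hu : c = '_' ∧ b = true
      · simp only [hu]
        cases rest with
        | nil => rfl
        | cons d t =>
          by_cases hd : d.isDigit = true
          · simp only [hd, if_true, ih]
          · simp [hd]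
      · simp [hu]

-- Lifts goChar through the one-argument wrapper around the digit-run parser,
-- specialised to strings that start with the digit '1'.
theorem dvChar (g : List Char → Option Nat) (f : List Char → Bool → Nat → Option Nat)
    (hg : ∀ cs, g ('1' :: cs) = f cs true 1)
    (h0 : ∀ b a, f [] b a = if b = true then some a else none)
    (h1 : ∀ c rest b a, f (c :: rest) b a =
      if c.isDigit = true then f rest true (a * 10 + (c.toNat - '0'.toNat))
      else
        if c = '_' ∧ b = true then
          match rest with
          | d :: _ => if d.isDigit = true then f rest false a else none
          | [] => none
        else none) :
    ∀ cs, g ('1' :: cs) = myGo cs true 1 :=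
  fun cs => (hg cs).trans (goChar f h0 h1 cs true 1)

theorem isIntSpace_of_isDigit (c : Char) (h : c.isDigit = true) : PySem.Int.isIntSpace c = false := by
  simp only [PySem.Int.isIntSpace, Bool.or_eq_false_iff, decide_eq_false_iff_not]
  and_intros <;> rintro rfl <;> simp at h

theorem dropWhile_eq_self_of_all {p : Char → Bool} (xs : List Char)
    (h : ∀ c ∈ xs, p c = false) : List.dropWhile p xs = xs := by
  cases xs with
  | nil => rfl
  | cons x t => simp [List.dropWhile, h x (List.mem_cons_self)]

theorem strip_one_digits (D : List Char) (hD : ∀ c ∈ D, c.isDigit = true) :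
    (List.dropWhile PySem.Int.isIntSpace
      (List.dropWhile PySem.Int.isIntSpace ('1' :: D)).reverse).reverse = '1' :: D := by
  have hsp : PySem.Int.isIntSpace '1' = false := rfl
  have h1 : List.dropWhile PySem.Int.isIntSpace ('1' :: D) = '1' :: D := by
    simp [hsp]
  rw [h1, List.reverse_cons]
  have h2 : List.dropWhile PySem.Int.isIntSpace (D.reverse ++ ['1']) = D.reverse ++ ['1'] := by
    apply dropWhile_eq_self_of_all
    intro c hc
    rcases List.mem_append.1 hc with hc | hc
    · exact isIntSpace_of_isDigit c (hD c (List.mem_reverse.1 hc))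
    · simp only [List.mem_singleton] at hc; subst hc; rfl
  rw [h2]
  simp

-- Bridge: ofChars? on '1' followed by digits, expressed through the reference parser myGo.
theorem ofChars?_one_digits (D : List Char) (hD : ∀ c ∈ D, c.isDigit = true) :
    PySem.Int.ofChars? ('1' :: D) =
      Option.map (fun n : Int => n)
        (Bind.bind (myGo D true 1) (fun a : Nat => Pure.pure ((a : Nat) : Int))) := by
  unfold PySem.Int.ofChars?
  rw [strip_one_digits D hD]
  exact congrArg
    (fun z => Option.map (fun n : Int => n) (Bind.bind z (fun a : Nat => Pure.pure ((a : Nat) : Int))))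
    (dvChar _ _ (fun cs => rfl) (by intro b a; rfl)
      (by intro c rest b a; cases rest <;> rfl) D)

theorem myGo_run (D : List Char) (hD : ∀ c ∈ D, c.isDigit = true) :
    ∀ a : Nat, myGo D true a = some (D.foldl (fun v d => v * 10 + (d.toNat - '0'.toNat)) a) := by
  induction D with
  | nil => intro a; rfl
  | cons c rest ih =>
    intro a
    simp only [myGo, hD c (List.mem_cons_self), if_true, List.foldl_cons]
    exact ih (fun d hd => hD d (List.mem_cons_of_mem _ hd)) _

theorem zfill_toChars (n : Nat) (h : n ≤ 126) :
    PySem.Chars.zfill (PySem.Int.toChars (n : Int)) 4 =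
      ['0', Char.ofNat (n / 100 % 10 + 48), Char.ofNat (n / 10 % 10 + 48), Char.ofNat (n % 10 + 48)] := by
  interval_cases n <;> rfl

theorem toNat_digitChar (k : Nat) (h : k < 10) : (Char.ofNat (k + 48)).toNat = k + 48 := by
  interval_cases k <;> rfl

theorem isDigit_digitChar (k : Nat) (h : k < 10) : (Char.ofNat (k + 48)).isDigit = true := by
  interval_cases k <;> rfl

theorem block_digits (c : Char) (h : pvDomChar c = true) :
    ∀ d ∈ PySem.Chars.zfill (PySem.Int.toChars ((c.toNat : Int))) 4, d.isDigit = true := by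
  have hle : c.toNat ≤ 126 := by
    simp only [pvDomChar, Bool.or_eq_true, Bool.and_eq_true, decide_eq_true_eq, beq_iff_eq] at h
    omega
  rw [zfill_toChars _ hle]
  intro d hd
  simp only [List.mem_cons, List.not_mem_nil, or_false] at hd
  rcases hd with rfl | rfl | rfl | rfl
  · rfl
  · exact isDigit_digitChar _ (by omega)
  · exact isDigit_digitChar _ (by omega)
  · exact isDigit_digitChar _ (by omega)

theorem block_fold (c : Char) (h : pvDomChar c = true) (a : Nat) :
    (PySem.Chars.zfill (PySem.Int.toChars ((c.toNat : Int))) 4).foldl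
      (fun v d => v * 10 + (d.toNat - '0'.toNat)) a = a * 10000 + c.toNat := by
  have hle : c.toNat ≤ 126 := by
    simp only [pvDomChar, Bool.or_eq_true, Bool.and_eq_true, decide_eq_true_eq, beq_iff_eq] at h
    omega
  rw [zfill_toChars _ hle]
  have h48 : ('0' : Char).toNat = 48 := rfl
  simp only [List.foldl_cons, List.foldl_nil, h48,
    toNat_digitChar _ (by omega : c.toNat / 100 % 10 < 10),
    toNat_digitChar _ (by omega : c.toNat / 10 % 10 < 10),
    toNat_digitChar _ (by omega : c.toNat % 10 < 10)]
  omega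

theorem main_fold (l : List Char) (h : ∀ c ∈ l, pvDomChar c = true) :
    ∀ a : Nat,
      (l.flatMap (fun c => PySem.Chars.zfill (PySem.Int.toChars ((c.toNat : Int))) 4)).foldl
        (fun v d => v * 10 + (d.toNat - '0'.toNat)) a =
      l.foldl (fun acc c => acc * 10000 + c.toNat) a := by
  induction l with
  | nil => intro a; rfl
  | cons c rest ih =>
    intro a
    rw [List.flatMap_cons, List.foldl_append, List.foldl_cons,
      block_fold c (h c (List.mem_cons_self)) a]
    exact ih (fun d hd => h d (List.mem_cons_of_mem _ hd)) _

theorem cast_fold (l : List Char) : ∀ a : Nat,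
    l.foldl (fun acc c => acc * 10000 + (c.toNat : Int)) (a : Int) =
      ((l.foldl (fun acc c => acc * 10000 + c.toNat) a : Nat) : Int) := by
  induction l with
  | nil => intro a; rfl
  | cons c rest ih =>
    intro a
    rw [List.foldl_cons, List.foldl_cons]
    rw [← ih]
    push_cast
    ring_nf

-- ===== VERDICT =====
theorem convert_message_to_int_spec : Claim_equal_convert_message_to_int := by
  intro message hdom _
  unfold Spec_convert_message_to_int convert_message_to_int convert_message_to_int_alt
  have hc : ∀ c ∈ message.toList, pvDomChar c = true := by
    have := hdom
    unfold Dom_convert_message_to_int pvDomStr at this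
    simpa [List.all_eq_true] using this
  rw [PySem.List.foldl_append_eq_flatMap]
  set D := message.toList.flatMap (fun c => PySem.Chars.zfill (PySem.Int.toChars ((c.toNat : Int))) 4) with hDdef
  have hDdig : ∀ d ∈ D, d.isDigit = true := by
    intro d hd
    rw [hDdef] at hd
    rcases List.mem_flatMap.1 hd with ⟨c, hcmem, hdin⟩
    exact block_digits c (hc c hcmem) d hdin
  have hcons : ('1' : Char) :: D = ['1'] ++ D := rfl
  rw [← hcons]
  rw [ofChars?_one_digits D hDdig]
  rw [myGo_run D hDdig 1, main_fold message.toList hc 1]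
  have : ((1 : Int)) = ((1 : Nat) : Int) := rfl
  rw [this, cast_fold]
  rfl
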